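-- pv_equiv track=rewrite | github.com/elkhaligy/LeetCode | 974. Subarray Sums Divisible by K (R).py | subarraysDivByK_prefixsum_frequencyDic_refactored
-- ===== SOURCE A (Python) =====
-- from collections import defaultdict, Counter
--
-- def subarraysDivByK_prefixsum_frequencyDic_refactored(nums: list[int], k: int) -> int:
--     prefix_mod_sum = 0
--     prefix_mod_sum_counts = Counter()
--     prefix_mod_sum_counts[0] = 1
--
--     ans = 0
--     for num in nums:
--         prefix_mod_sum = (prefix_mod_sum + num) % k
--         ans += prefix_mod_sum_counts[prefix_mod_sum]
--         prefix_mod_sum_counts[prefix_mod_sum] += 1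
--
--     return ans
-- ===== SOURCE B (Python) =====
-- def subarraysDivByK_prefixsum_frequencyDic_refactored(nums: list[int], k: int) -> int:
--     # Sort the prefix residues and count pairs inside each run of equal values.
--     prefix = 0
--     residues = [0]
--     for num in nums:
--         prefix = (prefix + num) % k
--         residues.append(prefix)
--     residues.sort()
--     total = 0
--     run = 1
--     prev = residues[0]
--     for r in residues[1:]:
--         if r == prev:
--             run += 1
--         else:
--             total += run * (run - 1) // 2
--             run = 1
--             prev = r
--     return total + run * (run - 1) // 2
-- ===== Notes on version B (the rewrite author's own statement) =====
-- stated objective: alternative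
-- what changed: B drops the Counter entirely: it collects the list of all prefix residues, sorts it, and counts run*(run-1)//2 over runs of equal values in one scan of the sorted list, instead of accumulating the answer from a frequency dictionary inside the loop.
import Mathlib
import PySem

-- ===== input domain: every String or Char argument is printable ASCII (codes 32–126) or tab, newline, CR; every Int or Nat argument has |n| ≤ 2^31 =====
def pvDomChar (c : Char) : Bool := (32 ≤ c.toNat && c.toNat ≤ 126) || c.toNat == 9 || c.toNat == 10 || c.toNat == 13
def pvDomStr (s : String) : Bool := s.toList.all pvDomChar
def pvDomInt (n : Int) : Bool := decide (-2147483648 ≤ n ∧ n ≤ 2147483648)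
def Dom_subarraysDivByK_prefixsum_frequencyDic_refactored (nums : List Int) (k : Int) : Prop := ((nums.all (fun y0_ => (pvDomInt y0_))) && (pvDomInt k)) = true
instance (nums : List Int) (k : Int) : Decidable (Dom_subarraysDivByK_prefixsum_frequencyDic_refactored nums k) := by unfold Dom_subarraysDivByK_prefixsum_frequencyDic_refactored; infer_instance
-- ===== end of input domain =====

-- B replaces A's Counter-based running accumulation by sort-the-prefix-residues then count pairs in equal runs; an alternative decomposition with no frequency dictionary.

-- ===== PORT A =====
-- one iteration of A's for-loop: state = (prefix_mod_sum, prefix_mod_sum_counts, ans)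
def pvStepA (k : Int) (st : Int × PySem.Dict Int Int × Int) (num : Int) : Int × PySem.Dict Int Int × Int :=
  let p := PySem.Int.mod (st.1 + num) k
  let ans := st.2.2 + st.2.1.getD p 0
  (p, st.2.1.modify p 0 (· + 1), ans)

def subarraysDivByK_prefixsum_frequencyDic_refactored (nums : List Int) (k : Int) : Int :=
  (nums.foldl (pvStepA k) (0, PySem.Dict.empty.insert 0 1, 0)).2.2

-- ===== PORT B =====
-- one iteration of B's first loop: state = (prefix, residues)
def pvStepRes (k : Int) (st : Int × List Int) (num : Int) : Int × List Int :=
  let p := PySem.Int.mod (st.1 + num) k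
  (p, st.2 ++ [p])

-- one iteration of B's second loop: state = (total, run, prev)
def pvStepRun (st : Int × Int × Int) (r : Int) : Int × Int × Int :=
  if r == st.2.2 then (st.1, st.2.1 + 1, st.2.2)
  else (st.1 + PySem.Int.floordiv (st.2.1 * (st.2.1 - 1)) 2, 1, r)

def subarraysDivByK_prefixsum_frequencyDic_refactored_alt (nums : List Int) (k : Int) : Int :=
  let residues := (nums.foldl (pvStepRes k) (0, [(0 : Int)])).2
  -- residues.sort(); prev = residues[0]; loop over residues[1:]. residues is never
  -- empty (it starts as [0]), so the [] branch is an unreachable totality guard.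
  match PySem.List.sorted residues (fun x => x) false with
  | [] => 0
  | x :: rest =>
    let st := rest.foldl pvStepRun (0, 1, x)
    st.1 + PySem.Int.floordiv (st.2.1 * (st.2.1 - 1)) 2

-- ===== PRECONDITION & SPEC =====
-- Pre_ excludes k = 0 with a nonempty list: there both A and B raise ZeroDivisionError on the first '% k'.
def Pre_subarraysDivByK_prefixsum_frequencyDic_refactored (nums : List Int) (k : Int) : Prop :=
  nums = [] ∨ k ≠ 0
instance (nums : List Int) (k : Int) : Decidable (Pre_subarraysDivByK_prefixsum_frequencyDic_refactored nums k) := by unfold Pre_subarraysDivByK_prefixsum_frequencyDic_refactored; infer_instance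

def pvWitness_subarraysDivByK_prefixsum_frequencyDic_refactored : List Int × Int := ([4, 5, 0, -2, -3, 1], 5)

def Spec_subarraysDivByK_prefixsum_frequencyDic_refactored (nums : List Int) (k : Int) (out : Int) : Prop := out = subarraysDivByK_prefixsum_frequencyDic_refactored_alt nums k
instance (nums : List Int) (k : Int) (out : Int) : Decidable (Spec_subarraysDivByK_prefixsum_frequencyDic_refactored nums k out) := by unfold Spec_subarraysDivByK_prefixsum_frequencyDic_refactored; infer_instance

-- ===== CLAIM (what is proved, stated in full; the proofs are below) =====
def Claim_equal_subarraysDivByK_prefixsum_frequencyDic_refactored : Prop := ∀ (nums : List Int) (k : Int), Dom_subarraysDivByK_prefixsum_frequencyDic_refactored nums k → Pre_subarraysDivByK_prefixsum_frequencyDic_refactored nums k → Spec_subarraysDivByK_prefixsum_frequencyDic_refactored nums k (subarraysDivByK_prefixsum_frequencyDic_refactored nums k)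

-- ===== LEMMAS AND PROOFS =====

-- the successive prefix residues produced from starting residue p
def pvScan (k p : Int) : List Int → List Int
  | [] => []
  | n :: l => PySem.Int.mod (p + n) k :: pvScan k (PySem.Int.mod (p + n) k) l

-- number of unordered pairs of equal elements in a list
def pvE : List Int → Int
  | [] => 0
  | x :: xs => (xs.count x : Int) + pvE xs

def pvPairs (c : Int) : Int := PySem.Int.floordiv (c * (c - 1)) 2

theorem pvPairs_succ (c : Int) : pvPairs (c + 1) = pvPairs c + c := by
  obtain ⟨m, hm⟩ := Int.even_mul_succ_self (c - 1)
  have h1 : c * (c - 1) = 2 * m := by rw [mul_comm]; simp only [sub_add_cancel] at hm; linarith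
  have h2 : (c + 1) * (c + 1 - 1) = 2 * (m + c) := by nlinarith [hm]
  simp only [pvPairs, PySem.Int.floordiv, h1, h2]
  rw [Int.mul_fdiv_cancel_left _ (by norm_num), Int.mul_fdiv_cancel_left _ (by norm_num)]

theorem pvE_append_singleton (l : List Int) (x : Int) :
    pvE (l ++ [x]) = pvE l + (l.count x : Int) := by
  induction l with
  | nil => simp [pvE]
  | cons a l ih =>
    simp only [List.cons_append, pvE, ih, List.count_append, List.count_cons, List.count_nil]
    by_cases h : a = x
    · simp [h]; ring
    · have h' : ¬ x = a := fun hh => h hh.symm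
      simp [h, h']; ring

theorem pvE_perm {l₁ l₂ : List Int} (h : l₁.Perm l₂) : pvE l₁ = pvE l₂ := by
  induction h with
  | nil => rfl
  | cons x h ih => simp only [pvE, ih, h.count_eq]
  | swap x y l =>
    simp only [pvE, List.count_cons]
    by_cases h : x = y
    · simp [h]
    · have h' : ¬ y = x := fun hh => h hh.symm
      simp [h, h']; ring
  | trans _ _ ih₁ ih₂ => exact ih₁.trans ih₂

theorem resFold (k : Int) (l : List Int) :
    ∀ (p : Int) (R : List Int), (l.foldl (pvStepRes k) (p, R)).2 = R ++ pvScan k p l := by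
  induction l with
  | nil => intro p R; simp [pvScan]
  | cons n l ih =>
    intro p R
    simp only [List.foldl_cons, pvStepRes, pvScan, ih]
    simp

theorem loopA (k : Int) (l : List Int) :
    ∀ (p : Int) (d : PySem.Dict Int Int) (ans : Int) (R : List Int),
      (∀ r, d.getD r 0 = (R.count r : Int)) →
      (l.foldl (pvStepA k) (p, d, ans)).2.2 = ans + pvE (R ++ pvScan k p l) - pvE R := by
  induction l with
  | nil => intro p d ans R _; simp [pvScan]
  | cons n l ih =>
    intro p d ans R hhist
    simp only [List.foldl_cons]
    have hstep : pvStepA k (p, d, ans) n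
        = (PySem.Int.mod (p + n) k,
           d.modify (PySem.Int.mod (p + n) k) 0 (· + 1),
           ans + d.getD (PySem.Int.mod (p + n) k) 0) := rfl
    rw [hstep]
    set p' := PySem.Int.mod (p + n) k with hp'
    have hhist' : ∀ r, (d.modify p' 0 (· + 1)).getD r 0 = ((R ++ [p']).count r : Int) := by
      intro r
      rw [PySem.Dict.getD_modify]
      by_cases h : r = p'
      · simp [h, hhist, List.count_append]
      · have h' : ¬ p' = r := fun hh => h hh.symm
        simp [h, h', hhist, List.count_append]
    rw [ih p' _ _ (R ++ [p']) hhist']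
    rw [hhist p', pvE_append_singleton]
    have : R ++ [p'] ++ pvScan k p' l = R ++ (p' :: pvScan k p' l) := by simp
    rw [this]
    show ans + (R.count p' : Int) + pvE (R ++ (p' :: pvScan k p' l)) - (pvE R + (R.count p' : Int))
        = ans + pvE (R ++ pvScan k p (n :: l)) - pvE R
    simp only [pvScan, ← hp']
    ring

theorem runFold (rest : List Int) :
    ∀ (total run prev : Int), List.Pairwise (· ≤ ·) (prev :: rest) →
      (rest.foldl pvStepRun (total, run, prev)).1
          + pvPairs (rest.foldl pvStepRun (total, run, prev)).2.1
        = total + pvPairs run + pvE rest + run * (rest.count prev : Int) := by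
  induction rest with
  | nil => intro total run prev _; simp [pvE]
  | cons r rs ih =>
    intro total run prev hsort
    have hpr : prev ≤ r := (List.pairwise_cons.mp hsort).1 r (by simp)
    have hsort' : List.Pairwise (· ≤ ·) (r :: rs) := (List.pairwise_cons.mp hsort).2
    simp only [List.foldl_cons, pvStepRun]
    by_cases h : r = prev
    · rw [if_pos (by simp [h])]
      rw [ih total (run + 1) prev (by rw [← h]; exact hsort')]
      simp only [pvE, List.count_cons, h, pvPairs_succ, beq_self_eq_true, if_true]
      push_cast
      ring
    · rw [if_neg (by simp [h])]
      rw [ih _ 1 r hsort']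
      have hlt : prev < r := lt_of_le_of_ne hpr (fun hh => h hh.symm)
      have hnotmem : prev ∉ r :: rs := by
        intro hm
        rcases List.mem_cons.mp hm with h1 | h1
        · exact absurd h1 (ne_of_lt hlt)
        · have : r ≤ prev := (List.pairwise_cons.mp hsort').1 prev h1
          exact absurd (lt_of_lt_of_le hlt this) (lt_irrefl prev)
      have hc : (r :: rs).count prev = 0 := List.count_eq_zero.mpr hnotmem
      have hcrs : rs.count prev = 0 := by
        simp only [List.count_cons] at hc
        omega
      have hp1 : pvPairs 1 = 0 := by decide
      have hfd : PySem.Int.floordiv (run * (run - 1)) 2 = pvPairs run := rfl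
      simp only [hfd, hp1, pvE, hc, Nat.cast_zero]
      ring

theorem altEq (nums : List Int) (k : Int) :
    subarraysDivByK_prefixsum_frequencyDic_refactored_alt nums k
      = pvE ((0 : Int) :: pvScan k 0 nums) := by
  unfold subarraysDivByK_prefixsum_frequencyDic_refactored_alt
  rw [resFold]
  simp only [List.cons_append, List.nil_append]
  set residues := (0 : Int) :: pvScan k 0 nums with hres
  have hperm : (PySem.List.sorted residues (fun x => x) false).Perm residues :=
    PySem.List.sorted_perm residues (fun x => x) false
  have hpw : (PySem.List.sorted residues (fun x => x) false).Pairwise (fun a b => a ≤ b) :=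
    PySem.List.sorted_pairwise residues (fun x => x)
  have hEs : pvE (PySem.List.sorted residues (fun x => x) false) = pvE residues := pvE_perm hperm
  cases hs : PySem.List.sorted residues (fun x => x) false with
  | nil =>
    have : residues = [] := by
      have := hperm.length_eq
      rw [hs] at this
      exact List.length_eq_zero_iff.mp this.symm
    simp [hres] at this
  | cons x rest =>
    rw [hs] at hpw hEs
    have := runFold rest 0 1 x hpw
    show (rest.foldl pvStepRun (0, 1, x)).1
        + PySem.Int.floordiv ((rest.foldl pvStepRun (0, 1, x)).2.1 * ((rest.foldl pvStepRun (0, 1, x)).2.1 - 1)) 2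
        = pvE residues
    have hp1 : pvPairs 1 = 0 := by decide
    calc (rest.foldl pvStepRun (0, 1, x)).1
          + PySem.Int.floordiv ((rest.foldl pvStepRun (0, 1, x)).2.1 * ((rest.foldl pvStepRun (0, 1, x)).2.1 - 1)) 2
        = (rest.foldl pvStepRun (0, 1, x)).1 + pvPairs (rest.foldl pvStepRun (0, 1, x)).2.1 := rfl
      _ = 0 + pvPairs 1 + pvE rest + 1 * (rest.count x : Int) := this
      _ = pvE (x :: rest) := by simp [pvE, hp1]; ring
      _ = pvE residues := hEs

-- ===== VERDICT (by name: the statement is the Claim_ definition above) =====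
theorem subarraysDivByK_prefixsum_frequencyDic_refactored_spec : Claim_equal_subarraysDivByK_prefixsum_frequencyDic_refactored := by
  intro nums k _ _
  unfold Spec_subarraysDivByK_prefixsum_frequencyDic_refactored
  rw [altEq]
  unfold subarraysDivByK_prefixsum_frequencyDic_refactored
  have hhist : ∀ r, (PySem.Dict.empty.insert (0 : Int) (1 : Int)).getD r 0
      = (([(0 : Int)].count r : Int)) := by
    intro r
    rw [PySem.Dict.getD_insert]
    by_cases h : r = 0
    · simp [h]
    · simp [h, PySem.Dict.getD_empty, List.count_singleton]
      exact fun hh => h hh.symm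
  rw [loopA k nums 0 _ 0 [(0 : Int)] hhist]
  simp [pvE]
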